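-- pv_equiv track=rewrite | github.com/naydichev/advent-of-code-solutions | 2015/24/puzzle_2.py | generate_first_grouping
-- ===== SOURCE A (Python) =====
-- from functools import reduce
-- from itertools import combinations, permutations
--
-- def generate_first_grouping(packages, target):
--     def product(group):
--         return reduce(lambda a, b: a * b, group)
--
--     first = 1
--     while first < len(packages):
--         possibles = []
--         for option in combinations(packages, first):
--             if sum(option) == target:
--                 possibles.append(option)
--
--         first += 1
--         if len(possibles):
--             for possible in sorted(possibles, key=product):
--                 yield possible, product(possible)
-- ===== SOURCE B (Python) =====
-- def generate_first_grouping(packages, target):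
--     # One DFS pass over all subsets (running sum and product), then group by size
--     # and sort each size bucket by product; DFS include-first order equals
--     # itertools.combinations order within each size, so stable sorting matches.
--     n = len(packages)
--     sols = []
--
--     def dfs(rem_index, chosen, s, p):
--         if rem_index == n:
--             if s == target and 0 < len(chosen) < n:
--                 sols.append((len(chosen), tuple(chosen), p))
--             return
--         x = packages[rem_index]
--         chosen.append(x)
--         dfs(rem_index + 1, chosen, s + x, p * x)
--         chosen.pop()
--         dfs(rem_index + 1, chosen, s, p)
--
--     dfs(0, [], 0, 1)
--
--     for k in range(1, n):
--         bucket = [(g, p) for (sz, g, p) in sols if sz == k]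
--         if bucket:
--             for pair in sorted(bucket, key=lambda t: t[1]):
--                 yield pair
-- ===== Notes on version B (the rewrite author's own statement) =====
-- stated objective: alternative
-- what changed: A runs one itertools.combinations pass per subset size (re-scanning all size-k combinations for each k) and computes each product twice by reduce; B does a single include/exclude DFS over the list carrying the running sum and product, records every solution once, and then groups solutions by size and stable-sorts each size bucket by the already-computed product.
import Mathlib
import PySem

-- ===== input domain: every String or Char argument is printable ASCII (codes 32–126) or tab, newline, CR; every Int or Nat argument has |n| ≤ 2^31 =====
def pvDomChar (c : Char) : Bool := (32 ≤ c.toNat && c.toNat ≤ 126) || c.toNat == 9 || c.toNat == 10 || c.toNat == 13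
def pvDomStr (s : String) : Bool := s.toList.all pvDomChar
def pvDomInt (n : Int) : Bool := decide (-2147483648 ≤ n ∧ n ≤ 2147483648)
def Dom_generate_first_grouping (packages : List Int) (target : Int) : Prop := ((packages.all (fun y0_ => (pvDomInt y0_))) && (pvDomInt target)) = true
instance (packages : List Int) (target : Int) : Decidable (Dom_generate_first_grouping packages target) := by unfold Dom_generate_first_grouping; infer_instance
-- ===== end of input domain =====

-- B replaces A's per-size passes over itertools.combinations by a single DFS over all
-- subsets carrying running sum and product, bucketing solutions by size ('alternative').

-- ===== PORT A =====
-- reduce(lambda a, b: a * b, group): only ever called on non-empty groups (size >= 1)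
def pvProductA (group : List Int) : Int :=
  match group with
  | [] => 0
  | x :: xs => xs.foldl (· * ·) x

-- the 'while first < len(packages)' loop of A
def pvALoop (packages : List Int) (target : Int) (first : Nat) : List (List Int × Int) :=
  if _h : first < packages.length then
    let possibles := (PySem.List.combinations packages first).filter (fun o => o.sum == target)
    (if possibles.length ≠ 0 then
        (PySem.List.sorted possibles pvProductA).map (fun p => (p, pvProductA p))
      else []) ++ pvALoop packages target (first + 1)
  else []
  termination_by packages.length - first

def generate_first_grouping (packages : List Int) (target : Int) : List (List Int × Int) :=
  pvALoop packages target 1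

-- ===== PORT B =====
-- B's dfs: recursion on the remaining suffix of packages, carrying chosen, running sum and product
def pvBDfs (target : Int) (n : Nat) : List Int → List Int → Int → Int → List (Int × List Int × Int)
  | [], chosen, s, p =>
      if s = target ∧ 0 < chosen.length ∧ chosen.length < n then
        [((chosen.length : Int), chosen, p)]
      else []
  | x :: rest, chosen, s, p =>
      pvBDfs target n rest (chosen ++ [x]) (s + x) (p * x) ++ pvBDfs target n rest chosen s p

def generate_first_grouping_alt (packages : List Int) (target : Int) : List (List Int × Int) :=
  let n := packages.length
  let sols := pvBDfs target n packages [] 0 1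
  (PySem.List.pyRange 1 (n : Int) 1).flatMap (fun k =>
    let bucket := (sols.filter (fun e => e.1 == k)).map (fun e => (e.2.1, e.2.2))
    if bucket ≠ [] then PySem.List.sorted bucket (fun t => t.2) else [])

-- ===== PRECONDITION & SPEC =====
def Spec_generate_first_grouping (packages : List Int) (target : Int) (out : List (List Int × Int)) : Prop := out = generate_first_grouping_alt packages target
instance (packages : List Int) (target : Int) (out : List (List Int × Int)) : Decidable (Spec_generate_first_grouping packages target out) := by unfold Spec_generate_first_grouping; infer_instance

-- ===== CLAIM (what is proved, stated in full; the proofs are below) =====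
def Claim_equal_generate_first_grouping : Prop := ∀ (packages : List Int) (target : Int), Dom_generate_first_grouping packages target → Spec_generate_first_grouping packages target (generate_first_grouping packages target)

-- ===== LEMMAS AND PROOFS =====

def pvSubs : List Int → List (List Int)
  | [] => [[]]
  | x :: xs => (pvSubs xs).map (x :: ·) ++ pvSubs xs

theorem pvSubs_filter_len (xs : List Int) (r : Nat) :
    (pvSubs xs).filter (fun g => g.length == r) = PySem.List.combinations xs r := by
  induction xs generalizing r with
  | nil =>
    cases r with
    | zero => simp [pvSubs, PySem.List.combinations_zero]
    | succ r => simp [pvSubs, PySem.List.combinations_nil_succ]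
  | cons x xs ih =>
    cases r with
    | zero =>
      simp [pvSubs, List.filter_append, List.filter_map, PySem.List.combinations_zero,
        Function.comp_def]
      exact (ih 0).trans (PySem.List.combinations_zero xs)
    | succ r =>
      simp [pvSubs, List.filter_append, List.filter_map, PySem.List.combinations_cons_succ,
        ← ih r, ← ih (r+1), Function.comp_def]

theorem pvBDfs_eq (target : Int) (n : Nat) (rem : List Int) :
    ∀ (chosen : List Int) (s p : Int),
    pvBDfs target n rem chosen s p =
      (pvSubs rem).filterMap (fun t =>
        if s + t.sum = target ∧ 0 < chosen.length + t.length ∧ chosen.length + t.length < n then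
          some (((chosen.length + t.length : Nat) : Int), chosen ++ t, p * t.foldl (· * ·) 1)
        else none) := by
  induction rem with
  | nil =>
    intro chosen s p
    by_cases h : s = target ∧ 0 < chosen.length ∧ chosen.length < n
    · simp [pvBDfs, pvSubs, h]
    · simp [pvBDfs, pvSubs, h]
  | cons x rest ih =>
    intro chosen s p
    simp only [pvBDfs, pvSubs, List.filterMap_append, List.filterMap_map, ih]
    congr 1
    apply List.filterMap_congr
    intro t ht
    simp only [Function.comp_apply, List.sum_cons, List.length_cons, List.length_append,
      List.length_nil, Nat.zero_add]
    have hfold : (x :: t).foldl (· * ·) 1 = x * t.foldl (· * ·) 1 := by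
      have := List.foldl_assoc (op := (· * · : Int → Int → Int)) (l := t) (a₁ := x) (a₂ := 1)
      simpa using this
    have hc : ((s + x) + t.sum = target ∧ 0 < (chosen.length + 1) + t.length ∧ (chosen.length + 1) + t.length < n)
        ↔ (s + (x + t.sum) = target ∧ 0 < chosen.length + (t.length + 1) ∧ chosen.length + (t.length + 1) < n) := by
      constructor <;> rintro ⟨h1, h2, h3⟩ <;> exact ⟨by linarith, by omega, by omega⟩
    by_cases h : s + (x + t.sum) = target ∧ 0 < chosen.length + (t.length + 1) ∧ chosen.length + (t.length + 1) < n
    · rw [if_pos (hc.mpr h), if_pos h]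
      simp only [Option.some.injEq, Prod.mk.injEq]
      refine ⟨by push_cast; omega, by simp [List.append_assoc], by rw [hfold]; ring⟩
    · rw [if_neg (fun hh => h (hc.mp hh)), if_neg h]

theorem pvProductA_foldl (g : List Int) (hg : g ≠ []) :
    g.foldl (· * ·) 1 = pvProductA g := by
  cases g with
  | nil => exact absurd rfl hg
  | cons x xs => simp [pvProductA]

theorem pvBucket_eq (target : Int) (n k : Nat) (hk : 1 ≤ k) (hkn : k < n) (L : List (List Int)) :
    ((L.filterMap (fun t =>
        if t.sum = target ∧ 0 < t.length ∧ t.length < n then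
          some ((t.length : Int), t, t.foldl (· * ·) 1)
        else none)).filter (fun e => e.1 == (k : Int))).map (fun e => (e.2.1, e.2.2))
      = ((L.filter (fun g => g.length == k)).filter (fun o => o.sum == target)).map
          (fun g => (g, pvProductA g)) := by
  induction L with
  | nil => simp
  | cons t L ih =>
    by_cases hlen : t.length = k
    · by_cases hsum : t.sum = target
      · have hcond : t.sum = target ∧ 0 < t.length ∧ t.length < n := ⟨hsum, by omega, by omega⟩
        have hne : t ≠ [] := by intro h; subst h; simp at hlen; omega
        simp [hcond, hlen, pvProductA_foldl t hne,
          show (0 < k ∧ k < n) from ⟨by omega, hkn⟩, ih, List.filter_filter, Bool.and_comm]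
      · have hcond : ¬ (t.sum = target ∧ 0 < t.length ∧ t.length < n) := fun h => hsum h.1
        simp [hlen, hsum, ih]
    · by_cases hcond : t.sum = target ∧ 0 < t.length ∧ t.length < n
      · have : ¬ ((t.length : Int) == (k : Int)) = true := by
          simp; omega
        simp [hcond, hlen, this, ih]
      · simp [hcond, hlen, ih]

theorem pvMap_insertBy (x : List Int) (acc : List (List Int)) :
    (PySem.List.insertBy (fun a b => decide (pvProductA a < pvProductA b)) x acc).map
        (fun g => (g, pvProductA g))
      = PySem.List.insertBy (fun a b : List Int × Int => decide (a.2 < b.2)) (x, pvProductA x)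
          (acc.map (fun g => (g, pvProductA g))) := by
  induction acc with
  | nil => simp [PySem.List.insertBy]
  | cons y ys ih =>
    simp only [PySem.List.insertBy, List.map_cons]
    by_cases h : pvProductA x < pvProductA y
    · simp [h]
    · simp [h, ih]

theorem pvSorted_map_pair (gs : List (List Int)) :
    PySem.List.sorted (gs.map (fun g => (g, pvProductA g))) (fun t => t.2) false
      = (PySem.List.sorted gs pvProductA false).map (fun g => (g, pvProductA g)) := by
  have aux : ∀ (l : List (List Int)) (acc : List (List Int)),
      (l.foldl (fun acc x => PySem.List.insertBy (fun a b => decide (pvProductA a < pvProductA b)) x acc) acc).map (fun g => (g, pvProductA g))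
        = (l.map (fun g => (g, pvProductA g))).foldl
            (fun acc x => PySem.List.insertBy (fun a b : List Int × Int => decide (a.2 < b.2)) x acc)
            (acc.map (fun g => (g, pvProductA g))) := by
    intro l
    induction l with
    | nil => intro acc; simp
    | cons x xs ih =>
      intro acc
      simp only [List.foldl_cons, List.map_cons]
      rw [ih, pvMap_insertBy]
  simpa [PySem.List.sorted] using (aux gs []).symm

theorem pvBlock_eq (packages : List Int) (target : Int) (k : Nat) (h1 : 1 ≤ k)
    (h2 : k < packages.length) :
    (if ((PySem.List.combinations packages k).filter (fun o => o.sum == target)).length ≠ 0 then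
        (PySem.List.sorted ((PySem.List.combinations packages k).filter (fun o => o.sum == target))
            pvProductA).map (fun p => (p, pvProductA p))
      else [])
      = (if ((pvBDfs target packages.length packages [] 0 1).filter
            (fun e => e.1 == (k : Int))).map (fun e => (e.2.1, e.2.2)) ≠ [] then
           PySem.List.sorted (((pvBDfs target packages.length packages [] 0 1).filter
            (fun e => e.1 == (k : Int))).map (fun e => (e.2.1, e.2.2))) (fun t => t.2)
         else []) := by
  have hsols : pvBDfs target packages.length packages [] 0 1
      = (pvSubs packages).filterMap (fun t =>
          if t.sum = target ∧ 0 < t.length ∧ t.length < packages.length then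
            some ((t.length : Int), t, t.foldl (· * ·) 1)
          else none) := by
    simpa using pvBDfs_eq target packages.length packages [] 0 1
  have hb : ((pvBDfs target packages.length packages [] 0 1).filter
        (fun e => e.1 == (k : Int))).map (fun e => (e.2.1, e.2.2))
      = ((PySem.List.combinations packages k).filter (fun o => o.sum == target)).map
          (fun g => (g, pvProductA g)) := by
    rw [hsols, pvBucket_eq target packages.length k h1 h2, pvSubs_filter_len]
  rw [hb]
  by_cases hp : ((PySem.List.combinations packages k).filter (fun o => o.sum == target)) = []
  · simp [hp]
  · have hlen : ((PySem.List.combinations packages k).filter (fun o => o.sum == target)).length ≠ 0 := by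
      simpa [List.length_eq_zero_iff] using hp
    rw [if_pos hlen, if_pos (by simpa using hp), pvSorted_map_pair]

theorem pvALoop_eq (packages : List Int) (target : Int) :
    ∀ (fuel first : Nat), 1 ≤ first → packages.length - first = fuel →
    pvALoop packages target first =
      (PySem.List.pyRange (first : Int) (packages.length : Int) 1).flatMap
        (fun k =>
          if ((pvBDfs target packages.length packages [] 0 1).filter
            (fun e => e.1 == k)).map (fun e => (e.2.1, e.2.2)) ≠ [] then
            PySem.List.sorted (((pvBDfs target packages.length packages [] 0 1).filter
              (fun e => e.1 == k)).map (fun e => (e.2.1, e.2.2))) (fun t => t.2)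
          else []) := by
  intro fuel
  induction fuel with
  | zero =>
    intro first h1 hf
    have hge : packages.length ≤ first := by omega
    rw [pvALoop, dif_neg (by omega), PySem.List.pyRange_one_eq_nil (by exact_mod_cast hge)]
    simp
  | succ fuel ih =>
    intro first h1 hf
    have hlt : first < packages.length := by omega
    rw [pvALoop, dif_pos hlt,
      PySem.List.pyRange_one_cons (by exact_mod_cast hlt), List.flatMap_cons]
    dsimp only
    congr 1
    · exact pvBlock_eq packages target first h1 hlt
    · have := ih (first + 1) (by omega) (by omega)
      rw [this]
      norm_cast

theorem pvFinal (packages : List Int) (target : Int) :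
    generate_first_grouping packages target = generate_first_grouping_alt packages target := by
  rw [generate_first_grouping, generate_first_grouping_alt,
    pvALoop_eq packages target (packages.length - 1) 1 (by omega) rfl]
  simp only [Nat.cast_one]


-- ===== VERDICT (by name: the statement is the Claim_ definition above) =====
theorem generate_first_grouping_spec : Claim_equal_generate_first_grouping := by
  intro packages target _
  unfold Spec_generate_first_grouping
  exact pvFinal packages target
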